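-- pv_equiv track=rewrite | github.com/VladiRashkov/Code-Wars | simple_fun.py | happy_or_not
-- ===== SOURCE A (Python) =====
-- def happy_or_not(w):
--     for i in range(len(w)):
--         if w[i] == 'g':
--             if (i > 0 and w[i-1] == 'g') or (i < len(w)-1 and w[i+1] == 'g'):
--                 continue
--             else:
--                 return False
--     return True
-- ===== SOURCE B (Python) =====
-- def happy_or_not(w):
--     # run-length scan: split w into maximal runs of identical characters;
--     # False iff some run of 'g' has length exactly 1
--     i, n = 0, len(w)
--     while i < n:
--         j = i
--         while j < n and w[j] == w[i]:
--             j += 1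
--         if w[i] == 'g' and j - i == 1:
--             return False
--         i = j
--     return True
-- ===== Notes on version B (the rewrite author's own statement) =====
-- stated objective: alternative
-- what changed: B replaces A's per-index neighbour inspection with a run-length scan: it splits the string into maximal runs of identical characters and returns False iff some 'g'-run has length exactly 1.
import Mathlib
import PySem

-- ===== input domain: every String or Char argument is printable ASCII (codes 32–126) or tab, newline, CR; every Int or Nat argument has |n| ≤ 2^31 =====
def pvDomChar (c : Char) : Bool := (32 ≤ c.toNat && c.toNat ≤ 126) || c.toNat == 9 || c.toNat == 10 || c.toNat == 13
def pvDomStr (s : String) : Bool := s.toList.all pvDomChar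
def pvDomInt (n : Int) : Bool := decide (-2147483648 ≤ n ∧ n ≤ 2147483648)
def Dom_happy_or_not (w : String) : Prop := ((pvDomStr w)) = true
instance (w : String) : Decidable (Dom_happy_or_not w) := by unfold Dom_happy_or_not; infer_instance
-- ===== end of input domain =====

-- B is a run-length scan instead of A's per-index neighbour inspection; same O(n) cost, different decomposition.

-- ===== PORT A =====
-- index loop over range(len(w)); all indexings (i, i-1 under i>0, i+1 under i<len-1) are in range, so getD is exact
def pvAGo (l : List Char) (i : Nat) : Bool :=
  if i < l.length then
    if l.getD i ' ' = 'g' then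
      if (0 < i ∧ l.getD (i-1) ' ' = 'g') ∨ (i < l.length - 1 ∧ l.getD (i+1) ' ' = 'g') then
        pvAGo l (i+1)
      else false
    else pvAGo l (i+1)
  else true
termination_by l.length - i
decreasing_by all_goals omega

def happy_or_not (w : String) : Bool := pvAGo w.toList 0

-- ===== PORT B =====
-- inner while loop: advance j while w[j] == c (c = w[i])
def pvBRun (l : List Char) (c : Char) (j : Nat) : Nat :=
  if h : j < l.length ∧ l.getD j ' ' = c then pvBRun l c (j+1) else j
termination_by l.length - j
decreasing_by omega

lemma pvBRun_ge (l : List Char) (c : Char) (j : Nat) : j ≤ pvBRun l c j := by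
  fun_induction pvBRun l c j with
  | case1 j h ih => omega
  | case2 j h => omega

-- outer while loop over run starts
def pvBGo (l : List Char) (i : Nat) : Bool :=
  if hi : i < l.length then
    let j := pvBRun l (l.getD i ' ') i
    if l.getD i ' ' = 'g' ∧ j - i = 1 then false else pvBGo l j
  else true
termination_by l.length - i
decreasing_by
  have h1 : pvBRun l (l.getD i ' ') i = pvBRun l (l.getD i ' ') (i+1) := by
    rw [pvBRun]; simp [hi]
  have h2 := pvBRun_ge l (l.getD i ' ') (i+1)
  omega

def happy_or_not_alt (w : String) : Bool := pvBGo w.toList 0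

-- ===== PRECONDITION & SPEC =====
def Spec_happy_or_not (w : String) (out : Bool) : Prop := out = happy_or_not_alt w
instance (w : String) (out : Bool) : Decidable (Spec_happy_or_not w out) := by unfold Spec_happy_or_not; infer_instance

-- ===== CLAIM (what is proved, stated in full; the proofs are below) =====
def Claim_equal_happy_or_not : Prop := ∀ (w : String), Dom_happy_or_not w → Spec_happy_or_not w (happy_or_not w)

-- ===== LEMMAS AND PROOFS =====

lemma pvBRun_gt (l : List Char) (c : Char) (i : Nat) (hi : i < l.length)
    (hc : l.getD i ' ' = c) : i < pvBRun l c i := by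
  rw [pvBRun]; simp only [hi, hc, and_self, dite_true]
  have := pvBRun_ge l c (i+1); omega

lemma pvBRun_le (l : List Char) (c : Char) (j : Nat) (h : j ≤ l.length) :
    pvBRun l c j ≤ l.length := by
  fun_induction pvBRun l c j with
  | case1 j hj ih => exact ih (by omega)
  | case2 j hj => exact h

lemma pvBRun_run (l : List Char) (c : Char) (j : Nat) :
    ∀ k, j ≤ k → k < pvBRun l c j → l.getD k ' ' = c := by
  fun_induction pvBRun l c j with
  | case1 j hj ih =>
    intro k hk1 hk2
    rcases Nat.eq_or_lt_of_le hk1 with h | h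
    · subst h; exact hj.2
    · exact ih k h hk2
  | case2 j hj => intro k hk1 hk2; omega

lemma pvBRun_stop (l : List Char) (c : Char) (j : Nat)
    (h : pvBRun l c j < l.length) : l.getD (pvBRun l c j) ' ' ≠ c := by
  fun_induction pvBRun l c j with
  | case1 j hj ih => exact ih h
  | case2 j hj => intro hc; exact hj ⟨h, hc⟩

-- A's loop skips a whole run of non-'g' characters
lemma pvAGo_skip_nong (l : List Char) (c : Char) (hc : c ≠ 'g') :
    ∀ n i j, j - i ≤ n → i ≤ j → j ≤ l.length →
    (∀ k, i ≤ k → k < j → l.getD k ' ' = c) → pvAGo l i = pvAGo l j := by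
  intro n
  induction n with
  | zero =>
    intro i j h1 h2 _ _
    have h : i = j := by omega
    exact congrArg (pvAGo l) h
  | succ n ih =>
    intro i j h1 h2 h3 hrun
    rcases Nat.eq_or_lt_of_le h2 with h | h
    · exact congrArg (pvAGo l) h
    · have hi : i < l.length := by omega
      have hci : l.getD i ' ' = c := hrun i (le_refl i) h
      rw [pvAGo]
      rw [if_pos hi, if_neg (by rw [hci]; exact hc)]
      exact ih (i+1) j (by omega) (by omega) h3 (fun k hk1 hk2 => hrun k (by omega) hk2)

-- A's loop steps through the interior of a 'g'-run using the left neighbour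
lemma pvAGo_skip_g_inner (l : List Char) :
    ∀ n i j, j - i ≤ n → i < j → j ≤ l.length →
    (∀ k, i ≤ k → k < j → l.getD k ' ' = 'g') → pvAGo l (i+1) = pvAGo l j := by
  intro n
  induction n with
  | zero => intro i j h1 h2 _ _; omega
  | succ n ih
  intro i j h1 h2 h3 hrun
  rcases Nat.eq_or_lt_of_le (Nat.succ_le_of_lt h2) with h | h
  · exact congrArg (pvAGo l) h
  · -- i+1 < j : step at i+1, left neighbour l[i] = 'g'
    have hi1 : i + 1 < l.length := by omega
    have hcur : l.getD (i+1) ' ' = 'g' := hrun (i+1) (by omega) h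
    have hleft : l.getD i ' ' = 'g' := hrun i (le_refl i) (by omega)
    rw [pvAGo]
    simp only [hi1, if_true, hcur, if_true]
    rw [if_pos (Or.inl ⟨by omega, by simpa using hleft⟩)]
    exact ih (i+1) j (by omega) h (by omega) (fun k hk1 hk2 => hrun k (by omega) hk2)

-- main: the two loops agree at every run start
lemma pvGo_eq (l : List Char) :
    ∀ n i, l.length - i ≤ n → (i = 0 ∨ l.getD (i-1) ' ' ≠ l.getD i ' ') →
    pvAGo l i = pvBGo l i := by
  intro n
  induction n with
  | zero =>
    intro i h1 _
    have hi : l.length ≤ i := by omega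
    rw [pvAGo, pvBGo]
    simp [Nat.not_lt_of_le hi]
  | succ n ih
  intro i h1 hstart
  by_cases hi : i < l.length
  case neg => rw [pvAGo, pvBGo]; simp [hi]
  obtain ⟨c, hc⟩ : ∃ c, c = l.getD i ' ' := ⟨_, rfl⟩
  obtain ⟨j, hj⟩ : ∃ j, j = pvBRun l c i := ⟨_, rfl⟩
  have hij : i < j := hj ▸ pvBRun_gt l c i hi hc.symm
  have hjl : j ≤ l.length := hj ▸ pvBRun_le l c i (by omega)
  have hrun : ∀ k, i ≤ k → k < j → l.getD k ' ' = c := fun k h1 h2 => pvBRun_run l c i k h1 (hj ▸ h2)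
  have hstop : j < l.length → l.getD j ' ' ≠ c := fun h => hj ▸ pvBRun_stop l c i (hj ▸ h)
  have hmn : l.length - j ≤ n := by
    calc l.length - j ≤ l.length - (i+1) := Nat.sub_le_sub_left hij _
      _ = l.length - i - 1 := (Nat.sub_sub _ _ _).symm
      _ ≤ (n+1) - 1 := Nat.sub_le_sub_right h1 1
  have hstepj : pvAGo l j = pvBGo l j := by
    rcases Nat.eq_or_lt_of_le hjl with h | h
    · rw [pvAGo, pvBGo]; simp [h]
    · refine ih j hmn (Or.inr ?_)
      have h1' : l.getD (j-1) ' ' = c :=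
        hrun (j-1) (Nat.le_sub_one_of_lt hij)
          (Nat.sub_lt (Nat.lt_of_le_of_lt (Nat.zero_le i) hij) Nat.one_pos)
      rw [h1']
      exact fun hcontra => hstop h hcontra.symm
  by_cases hg : c = 'g'
  · by_cases hone : j - i = 1
    · -- isolated 'g': both return false
      have hBgo : pvBGo l i = false := by
        rw [pvBGo]; simp only [hi, dite_true]
        rw [← hc, ← hj, if_pos ⟨hg, hone⟩]
      have hcg : l.getD i ' ' = 'g' := by rw [← hc]; exact hg
      have hAgo : pvAGo l i = false := by
        rw [pvAGo]
        rw [if_pos hi, if_pos hcg, if_neg]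
        rintro (⟨hpos, hl⟩ | ⟨hlt, hr⟩)
        · rcases hstart with h0 | hne
          · omega
          · rw [hcg] at hne; exact hne hl
        · -- right neighbour: i+1 = j; l[j] ≠ 'g' by run maximality
          have hi1 : i + 1 = j := by omega
          have h2 : l.getD (i+1) ' ' ≠ c := by rw [hi1]; exact hstop (by omega)
          rw [hg] at h2; exact h2 hr
      rw [hAgo, hBgo]
    · -- 'g'-run of length ≥ 2
      have hBgo : pvBGo l i = pvBGo l j := by
        rw [pvBGo]; simp only [hi, dite_true]
        rw [← hc, ← hj, if_neg (by rintro ⟨_, h1⟩; exact hone h1)]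
      have hfirst : pvAGo l i = pvAGo l (i+1) := by
        rw [pvAGo]
        rw [if_pos hi, if_pos (show l.getD i ' ' = 'g' by rw [← hc]; exact hg), if_pos]
        right
        have h1 : i + 1 < j := by omega
        constructor
        · omega
        · have := hrun (i+1) (by omega) h1; rw [hg] at this; exact this
      have hmid : pvAGo l (i+1) = pvAGo l j := by
        apply pvAGo_skip_g_inner l (j - i) i j (le_refl _) hij hjl
        intro k hk1 hk2
        have := hrun k hk1 hk2; rw [hg] at this; exact this
      rw [hfirst, hmid, hBgo, hstepj]
  · -- non-'g' run: A skips it index by index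
    have hBgo : pvBGo l i = pvBGo l j := by
      rw [pvBGo]; simp only [hi, dite_true]
      rw [← hc, ← hj, if_neg (by rintro ⟨h1, _⟩; exact hg h1)]
    have hAgo : pvAGo l i = pvAGo l j :=
      pvAGo_skip_nong l c hg (j - i) i j (le_refl _) (by omega) hjl hrun
    rw [hAgo, hBgo, hstepj]

-- ===== VERDICT (by name: the statement is the Claim_ definition above) =====
theorem happy_or_not_spec : Claim_equal_happy_or_not := by
  intro w _
  unfold Spec_happy_or_not happy_or_not happy_or_not_alt
  exact pvGo_eq w.toList w.toList.length 0 (by omega) (Or.inl rfl)
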